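-- pv_equiv track=rewrite | github.com/mygulamali/advent-of-code | src/2021/03.py | determine_gamma_rate
-- ===== SOURCE A (Python) =====
-- from typing import List, Optional
--
-- def determine_gamma_rate(report: List[str]) -> str:
--     n = len(list(report[0]))
--
--     ones = [0 for i in range(n)]
--     zeros = [0 for i in range(n)]
--     for line in report:
--         for i, bit in enumerate(line):
--             if bit == "1":
--                 ones[i] += 1
--             else:
--                 zeros[i] += 1
--
--     gamma_rate = ["1" if (ones[indx] >= zeros[indx]) else "0" for indx in range(n)]
--
--     return "".join(gamma_rate)
-- ===== SOURCE B (Python) =====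
-- def determine_gamma_rate(report):
--     n = len(report[0])
--     columns = [[] for _ in range(n)]
--     for line in report:
--         for i, bit in enumerate(line):
--             columns[i].append(1 if bit == "1" else 0)
--     return "".join("1" if sorted(c)[len(c) // 2] == 1 else "0" for c in columns)
-- ===== Notes on version B (the rewrite author's own statement) =====
-- stated objective: alternative
-- what changed: B transposes the report into per-column 0/1 bit lists and selects each gamma bit as the median of the sorted column (sorted(c)[len(c)//2]), so no ones/zeros counters are kept or compared, unlike A's row-major accumulation into parallel counter arrays.
import Mathlib
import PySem

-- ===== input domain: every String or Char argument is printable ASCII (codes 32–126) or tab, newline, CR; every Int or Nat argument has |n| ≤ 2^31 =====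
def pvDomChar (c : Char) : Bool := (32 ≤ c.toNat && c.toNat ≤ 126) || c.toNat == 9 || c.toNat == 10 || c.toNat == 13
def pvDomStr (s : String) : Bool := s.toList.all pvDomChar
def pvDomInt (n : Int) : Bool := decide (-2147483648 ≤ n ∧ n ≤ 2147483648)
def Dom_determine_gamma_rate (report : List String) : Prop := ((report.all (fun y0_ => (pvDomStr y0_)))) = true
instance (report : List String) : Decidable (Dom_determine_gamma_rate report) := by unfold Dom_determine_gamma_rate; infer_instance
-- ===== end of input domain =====

-- B transposes the report into per-column 0/1 bit lists and selects each gamma bit as the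
-- median of the sorted column (sorted(c)[len(c)//2]); no ones/zeros counters are kept or
-- compared (alternative algorithm: sort-and-select instead of counting).

-- ===== PORT A =====
-- inner loop body: 'if bit == "1": ones[i] += 1 else: zeros[i] += 1'
def pvBitStep (st : List Int × List Int) (ib : Int × Char) : List Int × List Int :=
  if ib.2 = '1' then (st.1.set ib.1.toNat (st.1.getD ib.1.toNat 0 + 1), st.2)
  else (st.1, st.2.set ib.1.toNat (st.2.getD ib.1.toNat 0 + 1))

-- 'for i, bit in enumerate(line): …'
def pvLineStep (st : List Int × List Int) (line : String) : List Int × List Int :=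
  (PySem.List.enumerate line.toList 0).foldl pvBitStep st

def determine_gamma_rate (report : List String) : String :=
  let n := (report.headD "").toList.length
  let ones : List Int := List.replicate n 0
  let zeros : List Int := List.replicate n 0
  let p := report.foldl pvLineStep (ones, zeros)
  String.ofList ((List.range n).map (fun indx => if p.1.getD indx 0 ≥ p.2.getD indx 0 then '1' else '0'))

-- ===== PORT B =====
-- inner loop body of the transpose: 'columns[i].append(1 if bit == "1" else 0)'
def pvColStep (cols : List (List Int)) (ib : Int × Char) : List (List Int) :=
  cols.set ib.1.toNat (cols.getD ib.1.toNat [] ++ [if ib.2 = '1' then (1 : Int) else 0])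

-- 'for i, bit in enumerate(line): columns[i].append(…)'
def pvColsLine (cols : List (List Int)) (line : String) : List (List Int) :=
  (PySem.List.enumerate line.toList 0).foldl pvColStep cols

def determine_gamma_rate_alt (report : List String) : String :=
  let n := (report.headD "").toList.length
  let columns := report.foldl pvColsLine (List.replicate n [])
  String.ofList (columns.map (fun c =>
    if (PySem.List.sorted c (fun x => x) false).getD (c.length / 2) 0 = 1 then '1' else '0'))

-- ===== PRECONDITION & SPEC =====
-- A raises IndexError when report is empty (report[0]) or when some line is longer than the
-- first line (ones[i] += 1 runs past the counter arrays); Pre_ excludes exactly those inputs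
-- (B raises there too: columns[i] runs past the width-n table).
def Pre_determine_gamma_rate (report : List String) : Prop :=
  report ≠ [] ∧ ∀ s ∈ report, s.toList.length ≤ (report.headD "").toList.length
instance (report : List String) : Decidable (Pre_determine_gamma_rate report) := by
  unfold Pre_determine_gamma_rate; infer_instance
def pvWitness_determine_gamma_rate : List String := ["101", "110", "011"]

def Spec_determine_gamma_rate (report : List String) (out : String) : Prop := out = determine_gamma_rate_alt report
instance (report : List String) (out : String) : Decidable (Spec_determine_gamma_rate report out) := by unfold Spec_determine_gamma_rate; infer_instance

-- ===== CLAIM (what is proved, stated in full; the proofs are below) =====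
def Claim_equal_determine_gamma_rate : Prop := ∀ (report : List String), Dom_determine_gamma_rate report → Pre_determine_gamma_rate report → Spec_determine_gamma_rate report (determine_gamma_rate report)

-- ===== LEMMAS AND PROOFS =====

lemma pv_getD_rep {α : Type} (x : α) (n i : Nat) : (List.replicate n x).getD i x = x := by
  induction n generalizing i with
  | zero => simp
  | succ n ih => cases i <;> simp [List.replicate_succ]

lemma pv_bump_self {α : Type} (l : List α) (d : α) (j : Nat) (v : α) (h : j < l.length) :
    (l.set j v).getD j d = v := by
  simp [List.getD_eq_getElem?_getD, h]

lemma pv_bump_ne {α : Type} (l : List α) (d : α) (i j : Nat) (v : α) (h : i ≠ j) :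
    (l.set j v).getD i d = l.getD i d := by
  simp [List.getD_eq_getElem?_getD, List.getElem?_set_ne (Ne.symm h)]

lemma pv_shift (i k : Nat) (c : Char) (cs : List Char) (P : Char → Prop) [DecidablePred P]
    (hik : i ≠ k) :
    (if k ≤ i ∧ i < k + (cs.length + 1) ∧ P ((c :: cs).getD (i - k) ' ') then (1 : Int) else 0)
      = (if k + 1 ≤ i ∧ i < (k + 1) + cs.length ∧ P (cs.getD (i - (k + 1)) ' ') then 1 else 0) := by
  by_cases hge : k + 1 ≤ i
  · have hgd : (c :: cs).getD (i - k) ' ' = cs.getD (i - (k + 1)) ' ' := by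
      have he : i - k = (i - (k + 1)) + 1 := by omega
      rw [he, List.getD_cons_succ]
    rw [hgd]
    exact if_congr (by constructor <;> rintro ⟨h1, h2, h3⟩ <;> exact ⟨by omega, by omega, h3⟩) rfl rfl
  · rw [if_neg (by omega), if_neg (by omega)]

lemma pv_gd0 (c : Char) (cs : List Char) (k : Nat) : (c :: cs).getD (k - k) ' ' = c := by
  rw [Nat.sub_self, List.getD_cons_zero]

-- the inner enumerate-fold of A, with a generalized start index
lemma pv_inner (cs : List Char) (k : Nat) (o z : List Int)
    (hko : k + cs.length ≤ o.length) (hkz : k + cs.length ≤ z.length) :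
    ((PySem.List.enumerate cs (k : Int)).foldl pvBitStep (o, z)).1.length = o.length ∧
    ((PySem.List.enumerate cs (k : Int)).foldl pvBitStep (o, z)).2.length = z.length ∧
    (∀ i : Nat,
      ((PySem.List.enumerate cs (k : Int)).foldl pvBitStep (o, z)).1.getD i 0
        = o.getD i 0 + (if k ≤ i ∧ i < k + cs.length ∧ cs.getD (i - k) ' ' = '1' then 1 else 0)) ∧
    (∀ i : Nat,
      ((PySem.List.enumerate cs (k : Int)).foldl pvBitStep (o, z)).2.getD i 0
        = z.getD i 0 + (if k ≤ i ∧ i < k + cs.length ∧ ¬ cs.getD (i - k) ' ' = '1' then 1 else 0)) := by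
  induction cs generalizing k o z with
  | nil =>
    simp only [PySem.List.enumerate_nil, List.foldl_nil, List.length_nil, Nat.add_zero]
    exact ⟨trivial, trivial, fun i => by rw [if_neg (by omega), add_zero],
      fun i => by rw [if_neg (by omega), add_zero]⟩
  | cons c cs ih =>
    have hcast : (k : Int) + 1 = ((k + 1 : Nat) : Int) := by push_cast; ring
    rw [PySem.List.enumerate_cons, List.foldl_cons, hcast]
    have hlen : (c :: cs).length = cs.length + 1 := rfl
    rw [hlen] at hko hkz
    by_cases hc : c = '1'
    · have hstep : pvBitStep (o, z) ((k : Int), c) = (o.set k (o.getD k 0 + 1), z) := by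
        simp [pvBitStep, hc]
      rw [hstep]
      obtain ⟨L1, L2, H1, H2⟩ := ih (k + 1) (o.set k (o.getD k 0 + 1)) z
        (by rw [List.length_set]; omega) (by omega)
      refine ⟨by rw [L1, List.length_set], L2, ?_, ?_⟩
      · intro i
        rw [H1 i, hlen]
        by_cases hik : i = k
        · subst hik
          rw [pv_bump_self o 0 i _ (by omega), if_neg (by omega), add_zero,
            if_pos ⟨le_refl i, by omega, by rw [pv_gd0]; exact hc⟩]
        · rw [pv_bump_ne o 0 i k _ hik, pv_shift i k c cs (fun ch => ch = '1') hik]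
      · intro i
        rw [H2 i, hlen]
        by_cases hik : i = k
        · subst hik
          have hnot : ¬(i ≤ i ∧ i < i + (cs.length + 1) ∧ ¬ (c :: cs).getD (i - i) ' ' = '1') := by
            rintro ⟨-, -, hne⟩; exact hne (by rw [pv_gd0]; exact hc)
          rw [if_neg (by omega), add_zero, if_neg hnot, add_zero]
        · rw [pv_shift i k c cs (fun ch => ¬ ch = '1') hik]
    · have hstep : pvBitStep (o, z) ((k : Int), c) = (o, z.set k (z.getD k 0 + 1)) := by
        simp [pvBitStep, hc]
      rw [hstep]
      obtain ⟨L1, L2, H1, H2⟩ := ih (k + 1) o (z.set k (z.getD k 0 + 1))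
        (by omega) (by rw [List.length_set]; omega)
      refine ⟨L1, by rw [L2, List.length_set], ?_, ?_⟩
      · intro i
        rw [H1 i, hlen]
        by_cases hik : i = k
        · subst hik
          have hnot : ¬(i ≤ i ∧ i < i + (cs.length + 1) ∧ (c :: cs).getD (i - i) ' ' = '1') := by
            rintro ⟨-, -, h1⟩; rw [pv_gd0] at h1; exact hc h1
          rw [if_neg (by omega), add_zero, if_neg hnot, add_zero]
        · rw [pv_shift i k c cs (fun ch => ch = '1') hik]
      · intro i
        rw [H2 i, hlen]
        by_cases hik : i = k
        · subst hik
          rw [pv_bump_self z 0 i _ (by omega), if_neg (by omega), add_zero,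
            if_pos ⟨le_refl i, by omega, by rw [pv_gd0]; exact hc⟩]
        · rw [pv_bump_ne z 0 i k _ hik, pv_shift i k c cs (fun ch => ¬ ch = '1') hik]

-- the outer fold of A over the report, against per-column countP
lemma pv_outer (lines : List String) (o z : List Int)
    (ho : ∀ s ∈ lines, s.toList.length ≤ o.length)
    (hz : ∀ s ∈ lines, s.toList.length ≤ z.length) :
    (∀ i : Nat, (lines.foldl pvLineStep (o, z)).1.getD i 0
        = o.getD i 0 + (lines.countP (fun s => decide (i < s.toList.length) && (s.toList.getD i ' ' == '1')) : Int)) ∧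
    (∀ i : Nat, (lines.foldl pvLineStep (o, z)).2.getD i 0
        = z.getD i 0 + (lines.countP (fun s => decide (i < s.toList.length) && !(s.toList.getD i ' ' == '1')) : Int)) := by
  induction lines generalizing o z with
  | nil => simp
  | cons s rest ih =>
    rw [List.foldl_cons]
    have hs0 : (0 : Int) = ((0 : Nat) : Int) := rfl
    have hstep : pvLineStep (o, z) s = (PySem.List.enumerate s.toList ((0 : Nat) : Int)).foldl pvBitStep (o, z) := by
      rw [pvLineStep, hs0]
    obtain ⟨L1, L2, H1, H2⟩ := pv_inner s.toList 0 o z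
      (by simpa using ho s (List.mem_cons_self))
      (by simpa using hz s (List.mem_cons_self))
    rw [← hstep] at L1 L2 H1 H2
    obtain ⟨G1, G2⟩ := ih (pvLineStep (o, z) s).1 (pvLineStep (o, z) s).2
      (fun t ht => by rw [L1]; exact ho t (List.mem_cons_of_mem s ht))
      (fun t ht => by rw [L2]; exact hz t (List.mem_cons_of_mem s ht))
    constructor
    · intro i
      rw [← Prod.mk.eta (p := pvLineStep (o, z) s), G1 i, H1 i, List.countP_cons]
      have hiff : (0 ≤ i ∧ i < 0 + s.toList.length ∧ s.toList.getD (i - 0) ' ' = '1')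
          ↔ ((decide (i < s.toList.length) && (s.toList.getD i ' ' == '1')) = true) := by
        simp
      rw [if_congr hiff rfl rfl]
      push_cast
      split_ifs <;> ring
    · intro i
      rw [← Prod.mk.eta (p := pvLineStep (o, z) s), G2 i, H2 i, List.countP_cons]
      have hiff : (0 ≤ i ∧ i < 0 + s.toList.length ∧ ¬ s.toList.getD (i - 0) ' ' = '1')
          ↔ ((decide (i < s.toList.length) && !(s.toList.getD i ' ' == '1')) = true) := by
        simp
      rw [if_congr hiff rfl rfl]
      push_cast
      split_ifs <;> ring

lemma pv_count_split (report : List String) (i : Nat) :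
    report.countP (fun s => decide (i < s.toList.length))
      = report.countP (fun s => decide (i < s.toList.length) && (s.toList.getD i ' ' == '1'))
      + report.countP (fun s => decide (i < s.toList.length) && !(s.toList.getD i ' ' == '1')) := by
  induction report with
  | nil => rfl
  | cons s rest ih =>
    simp only [List.countP_cons]
    cases hd : decide (i < s.toList.length) <;>
      cases hb : (s.toList.getD i ' ' == '1') <;>
        simp_all <;> omega

lemma pv_shift_col (i k : Nat) (c : Char) (cs : List Char) (hik : i ≠ k) :
    (if k ≤ i ∧ i < k + (cs.length + 1)
        then [if (c :: cs).getD (i - k) ' ' = '1' then (1 : Int) else 0] else ([] : List Int))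
      = (if k + 1 ≤ i ∧ i < (k + 1) + cs.length
        then [if cs.getD (i - (k + 1)) ' ' = '1' then (1 : Int) else 0] else []) := by
  by_cases hge : k + 1 ≤ i
  · have hgd : (c :: cs).getD (i - k) ' ' = cs.getD (i - (k + 1)) ' ' := by
      have he : i - k = (i - (k + 1)) + 1 := by omega
      rw [he, List.getD_cons_succ]
    rw [hgd]
    exact if_congr (by constructor <;> rintro ⟨h1, h2⟩ <;> exact ⟨by omega, by omega⟩) rfl rfl
  · rw [if_neg (by omega), if_neg (by omega)]

-- the inner enumerate-fold of B's transpose, with a generalized start index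
lemma pv_inner_col (cs : List Char) (k : Nat) (cols : List (List Int))
    (hk : k + cs.length ≤ cols.length) :
    ((PySem.List.enumerate cs (k : Int)).foldl pvColStep cols).length = cols.length ∧
    (∀ i : Nat,
      ((PySem.List.enumerate cs (k : Int)).foldl pvColStep cols).getD i []
        = cols.getD i [] ++ (if k ≤ i ∧ i < k + cs.length
            then [if cs.getD (i - k) ' ' = '1' then (1 : Int) else 0] else [])) := by
  induction cs generalizing k cols with
  | nil =>
    simp only [PySem.List.enumerate_nil, List.foldl_nil, List.length_nil, Nat.add_zero]
    exact ⟨trivial, fun i => by rw [if_neg (by omega), List.append_nil]⟩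
  | cons c cs ih =>
    have hcast : (k : Int) + 1 = ((k + 1 : Nat) : Int) := by push_cast; ring
    rw [PySem.List.enumerate_cons, List.foldl_cons, hcast]
    have hlen : (c :: cs).length = cs.length + 1 := rfl
    rw [hlen] at hk
    have hstep : pvColStep cols ((k : Int), c)
        = cols.set k (cols.getD k [] ++ [if c = '1' then (1 : Int) else 0]) := by
      simp [pvColStep]
    rw [hstep]
    obtain ⟨L, H⟩ := ih (k + 1) (cols.set k (cols.getD k [] ++ [if c = '1' then (1 : Int) else 0]))
      (by rw [List.length_set]; omega)
    refine ⟨by rw [L, List.length_set], ?_⟩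
    intro i
    rw [H i, hlen]
    by_cases hik : i = k
    · subst hik
      rw [pv_bump_self cols ([] : List Int) i _ (show i < cols.length by omega),
        if_neg (show ¬(i + 1 ≤ i ∧ i < i + 1 + cs.length) by omega), List.append_nil,
        if_pos (show i ≤ i ∧ i < i + (cs.length + 1) from ⟨le_refl i, by omega⟩), pv_gd0]
    · rw [pv_bump_ne cols [] i k _ hik, pv_shift_col i k c cs hik]

-- the outer fold of B's transpose over the report
lemma pv_outer_col (lines : List String) (cols : List (List Int))
    (h : ∀ s ∈ lines, s.toList.length ≤ cols.length) :
    (lines.foldl pvColsLine cols).length = cols.length ∧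
    (∀ i : Nat, (lines.foldl pvColsLine cols).getD i []
        = cols.getD i []
          ++ (lines.filter (fun s => decide (i < s.toList.length))).map
              (fun s => if s.toList.getD i ' ' = '1' then (1 : Int) else 0)) := by
  induction lines generalizing cols with
  | nil => simp
  | cons s rest ih =>
    rw [List.foldl_cons]
    have hs0 : (0 : Int) = ((0 : Nat) : Int) := rfl
    have hstep : pvColsLine cols s = (PySem.List.enumerate s.toList ((0 : Nat) : Int)).foldl pvColStep cols := by
      rw [pvColsLine, hs0]
    obtain ⟨L, H⟩ := pv_inner_col s.toList 0 cols (by simpa using h s (List.mem_cons_self))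
    rw [← hstep] at L H
    obtain ⟨G, K⟩ := ih (pvColsLine cols s)
      (fun t ht => by rw [L]; exact h t (List.mem_cons_of_mem s ht))
    refine ⟨by rw [G, L], ?_⟩
    intro i
    rw [K i, H i, List.filter_cons]
    by_cases hp : i < s.toList.length
    · have hpb : decide (i < s.toList.length) = true := by simpa using hp
      have hind : 0 ≤ i ∧ i < 0 + s.toList.length := ⟨Nat.zero_le i, by omega⟩
      rw [if_pos hpb, if_pos hind, List.map_cons,
        List.append_assoc, Nat.sub_zero, List.singleton_append]
    · have hpb : ¬ decide (i < s.toList.length) = true := by simpa using hp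
      have hind : ¬ (0 ≤ i ∧ i < 0 + s.toList.length) := by omega
      rw [if_neg hpb, if_neg hind, List.append_nil]

-- a 0/1 list sorts to (count 0) zeros followed by (count 1) ones
lemma pv_sorted_bits (l : List Int) (h : ∀ x ∈ l, x = 0 ∨ x = 1) :
    PySem.List.sorted l (fun x => x) false
      = List.replicate (l.count 0) 0 ++ List.replicate (l.count 1) 1 := by
  apply PySem.List.sorted_id_eq_of_perm_of_pairwise
  · rw [List.perm_iff_count]
    intro a
    rw [List.count_append, List.count_replicate, List.count_replicate]
    by_cases h0 : a = 0
    · subst h0; simp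
    · by_cases h1 : a = 1
      · subst h1; simp
      · have : l.count a = 0 := by
          rw [List.count_eq_zero]
          intro hmem
          rcases h a hmem with rfl | rfl <;> simp_all
        simp [this, Ne.symm h0, Ne.symm h1]
  · rw [List.pairwise_append]
    refine ⟨List.pairwise_replicate.2 (Or.inr (le_refl _)),
      List.pairwise_replicate.2 (Or.inr (le_refl _)), ?_⟩
    intro a ha b hb
    rw [List.eq_of_mem_replicate ha, List.eq_of_mem_replicate hb]
    norm_num

lemma pv_rep_getD (z o j : Nat) :
    ((List.replicate z (0 : Int)) ++ List.replicate o 1).getD j 0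
      = if j < z then 0 else if j < z + o then 1 else 0 := by
  rw [List.getD_eq_getElem?_getD]
  by_cases hz : j < z
  · rw [List.getElem?_append_left (by simpa using hz), List.getElem?_replicate, if_pos hz,
      if_pos hz]
    rfl
  · rw [List.getElem?_append_right (by simpa using hz), List.length_replicate, if_neg hz]
    by_cases ho : j < z + o
    · rw [List.getElem?_replicate, if_pos (by omega), if_pos ho]
      rfl
    · rw [List.getElem?_replicate, if_neg (by omega), if_neg ho]
      rfl

lemma pv_map_eq_range {α β : Type} (l : List α) (d : α) (f : α → β) :
    l.map f = (List.range l.length).map (fun i => f (l.getD i d)) := by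
  apply List.ext_getElem (by simp)
  intro i h1 h2
  simp only [List.getElem_map, List.getElem_range]
  rw [List.getD_eq_getElem l d (by simpa using h2)]

-- ===== VERDICT (by name: the statement is the Claim_ definition above) =====
theorem determine_gamma_rate_spec : Claim_equal_determine_gamma_rate := by
  intro report _ hpre
  obtain ⟨hne, hall⟩ := hpre
  unfold Spec_determine_gamma_rate determine_gamma_rate determine_gamma_rate_alt
  obtain ⟨H1, H2⟩ := pv_outer report
    (List.replicate (report.headD "").toList.length 0)
    (List.replicate (report.headD "").toList.length 0)
    (fun t ht => by rw [List.length_replicate]; exact hall t ht)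
    (fun t ht => by rw [List.length_replicate]; exact hall t ht)
  obtain ⟨Lc, Hc⟩ := pv_outer_col report
    (List.replicate (report.headD "").toList.length [])
    (fun t ht => by rw [List.length_replicate]; exact hall t ht)
  show String.ofList ((List.range (report.headD "").toList.length).map (fun indx =>
      if (List.foldl pvLineStep
            (List.replicate (report.headD "").toList.length 0,
             List.replicate (report.headD "").toList.length 0) report).1.getD indx 0
          ≥ (List.foldl pvLineStep
            (List.replicate (report.headD "").toList.length 0,
             List.replicate (report.headD "").toList.length 0) report).2.getD indx 0
        then '1' else '0'))
    = String.ofList ((List.foldl pvColsLine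
          (List.replicate (report.headD "").toList.length []) report).map
        (fun c => if (PySem.List.sorted c (fun x => x) false).getD (c.length / 2) 0 = 1
          then '1' else '0'))
  rw [pv_map_eq_range _ ([] : List Int), Lc, List.length_replicate]
  apply congrArg String.ofList
  apply List.map_congr_left
  intro i hi
  rw [List.mem_range] at hi
  have e1 := H1 i
  rw [pv_getD_rep, zero_add] at e1
  have e2 := H2 i
  rw [pv_getD_rep, zero_add] at e2
  have ec := Hc i
  rw [pv_getD_rep, List.nil_append] at ec
  rw [e1, e2, ec]
  set O := report.countP (fun s => decide (i < s.toList.length) && (s.toList.getD i ' ' == '1')) with hO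
  set Z := report.countP (fun s => decide (i < s.toList.length) && !(s.toList.getD i ' ' == '1')) with hZ
  set bits := (report.filter (fun s => decide (i < s.toList.length))).map
      (fun s => if s.toList.getD i ' ' = '1' then (1 : Int) else 0) with hbits
  have hmem : ∀ x ∈ bits, x = 0 ∨ x = 1 := by
    intro x hx
    rw [hbits, List.mem_map] at hx
    obtain ⟨s, -, rfl⟩ := hx
    split_ifs <;> simp
  have hc0 : bits.count 0 = Z := by
    rw [hbits, List.count_eq_countP, List.countP_map, List.countP_filter, hZ]
    apply List.countP_congr
    intro s _
    simp only [Function.comp]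
    constructor
    · intro h
      simp only [Bool.and_eq_true, decide_eq_true_eq] at h ⊢
      split_ifs at h with hb
      · simp at h
      · exact ⟨h.2, by simpa using hb⟩
    · intro h
      simp only [Bool.and_eq_true, decide_eq_true_eq, Bool.not_eq_true', beq_eq_false_iff_ne] at h
      simp only [Bool.and_eq_true, decide_eq_true_eq]
      rw [if_neg h.2]
      exact ⟨by decide, h.1⟩
  have hc1 : bits.count 1 = O := by
    rw [hbits, List.count_eq_countP, List.countP_map, List.countP_filter, hO]
    apply List.countP_congr
    intro s _
    simp only [Function.comp]
    constructor
    · intro h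
      simp only [Bool.and_eq_true, decide_eq_true_eq] at h ⊢
      split_ifs at h with hb
      · exact ⟨h.2, by simpa using hb⟩
      · simp at h
    · intro h
      simp only [Bool.and_eq_true, decide_eq_true_eq, beq_iff_eq] at h
      simp only [Bool.and_eq_true, decide_eq_true_eq]
      rw [if_pos h.2]
      exact ⟨by decide, h.1⟩
  have hsort : PySem.List.sorted bits (fun x => x) false
      = List.replicate Z 0 ++ List.replicate O 1 := by
    rw [pv_sorted_bits _ hmem, hc0, hc1]
  have hlen : bits.length = Z + O := by
    have := pv_count_split report i
    rw [← hO, ← hZ] at this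
    rw [hbits, List.length_map, ← List.countP_eq_length_filter, this]
    omega
  have hpos : 0 < Z + O := by
    have hsplit := pv_count_split report i
    rw [← hO, ← hZ] at hsplit
    have : 0 < report.countP (fun s => decide (i < s.toList.length)) := by
      apply List.countP_pos_iff.2
      refine ⟨report.headD "", ?_, by simpa using hi⟩
      cases report with
      | nil => exact absurd rfl hne
      | cons a t => exact List.mem_cons_self
    omega
  show (if (O : Int) ≥ (Z : Int) then '1' else '0')
      = if (PySem.List.sorted bits (fun x => x) false).getD (bits.length / 2) 0 = 1 then '1' else '0'
  rw [hlen, hsort, pv_rep_getD]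
  by_cases hm : (Z + O) / 2 < Z
  · have hOZ : O < Z := by omega
    rw [if_pos hm, if_neg (show ¬((0 : Int) = 1) by decide),
      if_neg (not_le.2 (show (O : Int) < (Z : Int) from by exact_mod_cast hOZ))]
  · have hZO : Z ≤ O := by omega
    rw [if_pos (show (O : Int) ≥ (Z : Int) from by exact_mod_cast hZO), if_neg hm,
      if_pos (show (Z + O) / 2 < Z + O by omega), if_pos (rfl : (1 : Int) = 1)]
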